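-- pv_equiv track=rewrite | github.com/president-xd/Writeups | HTB/Challenges/Crypto/noncesense_encryption/solution.py | recover_generator_for_nonce
-- ===== SOURCE A (Python) =====
-- from math import gcd
--
-- K = 0x13373           # same k as in the challenge
--
-- def crt_pair(a1, n1, a2, n2):
--     """
--     Solve:
--         x ≡ a1 (mod n1)
--         x ≡ a2 (mod n2)
--
--     Return (x mod lcm(n1, n2), lcm(n1, n2)) or (None, None) if inconsistent.
--     """
--     g = gcd(n1, n2)
--     if (a2 - a1) % g != 0:
--         return None, None
--
--     # Reduced moduli
--     n1p, n2p = n1 // g, n2 // g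
--
--     # Extended GCD to get inverse of n1p mod n2p
--     def eg(a, b):
--         if b == 0:
--             return 1, 0, a
--         x, y, g2 = eg(b, a % b)
--         return y, x - (a // b) * y, g2
--
--     inv, _, _ = eg(n1p, n2p)
--     inv %= n2p
--
--     t = ((a2 - a1) // g * inv) % n2p
--     x = a1 + n1 * t
--     lcm = n1 * n2p
--     return x % lcm, lcm
--
-- def recover_generator_for_nonce(base_keys, nonce_guess, k=K):
--     """
--     Given base_keys[i] = G mod (k * (nonce + i)),
--     and a guessed nonce, reconstruct G using CRT.
--
--     For a wrong nonce, we still get some integer G, but it will not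
--     correspond to a nice ASCII "HTB{...}" flag.
--     """
--     a = base_keys[0]
--     n = k * (nonce_guess + 0)
--
--     for i in range(1, len(base_keys)):
--         Mi = k * (nonce_guess + i)
--         ai = base_keys[i] % Mi
--         a, n = crt_pair(a, n, ai, Mi)
--         if a is None:
--             return None  # inconsistent, but this rarely happens
--
--     # Generator is smaller than the product of moduli, so we can just take 'a'
--     return a
-- ===== SOURCE B (Python) =====
-- from math import gcd
--
-- K = 0x13373
--
-- def recover_generator_for_nonce(base_keys, nonce_guess, k=K):
--     # Build the whole congruence system up front, then fold it with an
--     # inlined merge that uses an ITERATIVE extended Euclid (no recursion,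
--     # no helper function, no separate crt_pair).
--     systems = [(base_keys[0], k * nonce_guess)] + [
--         (base_keys[i] % (k * (nonce_guess + i)), k * (nonce_guess + i))
--         for i in range(1, len(base_keys))
--     ]
--     a, n = systems[0]
--     for ai, m in systems[1:]:
--         g = gcd(n, m)
--         if (ai - a) % g != 0:
--             return None
--         mg = m // g
--         # Bezout coefficient of n//g modulo mg, iteratively
--         r0, r1, s0, s1 = n // g, mg, 1, 0
--         while r1 != 0:
--             q = r0 // r1
--             r0, r1, s0, s1 = r1, r0 - q * r1, s1, s0 - q * s1
--         t = ((ai - a) // g * (s0 % mg)) % mg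
--         a, n = (a + n * t) % (n * mg), n * mg
--     return a
-- ===== Notes on version B (the rewrite author's own statement) =====
-- stated objective: alternative
-- what changed: B precomputes the whole congruence system as a list and merges it with a single inlined CRT step that uses an iterative extended-Euclid while-loop, replacing A's per-step crt_pair helper with its nested recursive egcd function.
-- outside the precondition, e.g. on recover_generator_for_nonce([1, 0, 0], -2, 2): A returns None, B raises ZeroDivisionError; on recover_generator_for_nonce([5, 7], 0, 3): A returns None, B returns None
import Mathlib
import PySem

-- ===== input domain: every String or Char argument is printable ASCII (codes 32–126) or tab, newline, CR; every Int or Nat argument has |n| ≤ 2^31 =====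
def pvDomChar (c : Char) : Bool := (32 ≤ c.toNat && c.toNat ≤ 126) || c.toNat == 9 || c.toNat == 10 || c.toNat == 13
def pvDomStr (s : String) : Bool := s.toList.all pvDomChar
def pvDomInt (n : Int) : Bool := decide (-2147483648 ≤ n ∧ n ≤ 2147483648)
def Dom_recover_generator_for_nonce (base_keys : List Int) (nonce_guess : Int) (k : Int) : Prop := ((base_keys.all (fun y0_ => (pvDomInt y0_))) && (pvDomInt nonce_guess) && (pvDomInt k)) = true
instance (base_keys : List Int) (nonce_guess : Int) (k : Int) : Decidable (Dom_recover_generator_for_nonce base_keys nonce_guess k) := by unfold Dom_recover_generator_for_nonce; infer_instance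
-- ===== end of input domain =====

-- B replaces A's crt_pair helper with a recursive extended Euclid by an inlined
-- merge over a precomputed congruence list using an ITERATIVE extended Euclid
-- (objective: alternative decomposition, same asymptotic cost).

-- termination lemma used by both ports' Euclid recursions
theorem pvModNatAbsLt (a b : Int) (hb : b ≠ 0) :
    (PySem.Int.mod a b).natAbs < b.natAbs := by
  rcases lt_trichotomy b 0 with h | h | h
  · have := PySem.Int.mod_neg_bounds a h
    omega
  · exact absurd h hb
  · have h1 := PySem.Int.mod_nonneg a h
    have h2 := PySem.Int.mod_lt a h
    omega

-- ===== PORT A =====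
-- nested helper eg(a, b) of crt_pair (recursive extended gcd)
def pvEg (a b : Int) : Int × Int × Int :=
  if hb : b = 0 then (1, 0, a)
  else
    let r := pvEg b (PySem.Int.mod a b)
    (r.2.1, r.1 - PySem.Int.floordiv a b * r.2.1, r.2.2)
termination_by b.natAbs
decreasing_by exact pvModNatAbsLt a b hb

-- crt_pair; (None, None) is ported as none
def pvCrtPair (a1 n1 a2 n2 : Int) : Option (Int × Int) :=
  let g : Int := Int.gcd n1 n2
  if PySem.Int.mod (a2 - a1) g ≠ 0 then none
  else
    let n1p := PySem.Int.floordiv n1 g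
    let n2p := PySem.Int.floordiv n2 g
    let inv := PySem.Int.mod (pvEg n1p n2p).1 n2p
    let t := PySem.Int.mod (PySem.Int.floordiv (a2 - a1) g * inv) n2p
    let x := a1 + n1 * t
    let lcm := n1 * n2p
    some (PySem.Int.mod x lcm, lcm)

-- the 'for i in range(1, len(base_keys))' loop with its early 'return None'
def pvLoopA (bks : List Int) (ng k : Int) : List Int → Int × Int → Option Int
  | [], (a, _) => some a
  | i :: rest, (a, n) =>
      let Mi := k * (ng + i)
      let ai := PySem.Int.mod ((PySem.List.pyGet? bks i).getD 0) Mi  -- i always in range here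
      match pvCrtPair a n ai Mi with
      | none => none
      | some st => pvLoopA bks ng k rest st

def recover_generator_for_nonce (base_keys : List Int) (nonce_guess : Int) (k : Int) : Option Int :=
  match PySem.List.pyGet? base_keys 0 with
  | none => none  -- base_keys[0] raises IndexError; excluded by Pre_
  | some a0 =>
      pvLoopA base_keys nonce_guess k
        (PySem.List.pyRange 1 base_keys.length 1) (a0, k * (nonce_guess + 0))

-- ===== PORT B =====
-- the iterative extended-Euclid 'while r1 != 0' loop; returns the final s0
def pvEgLoop (r0 r1 s0 s1 : Int) : Int :=
  if h : r1 = 0 then s0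
  else
    let q := PySem.Int.floordiv r0 r1
    pvEgLoop r1 (r0 - q * r1) s1 (s0 - q * s1)
termination_by r1.natAbs
decreasing_by
  have : r0 - PySem.Int.floordiv r0 r1 * r1 = PySem.Int.mod r0 r1 := by
    have := PySem.Int.floordiv_mul_add_mod r0 r1
    omega
  rw [this]; exact pvModNatAbsLt r0 r1 h

-- one iteration of B's merge loop body
def pvStepB (st p : Int × Int) : Option (Int × Int) :=
  let g : Int := Int.gcd st.2 p.2
  if PySem.Int.mod (p.1 - st.1) g ≠ 0 then none
  else
    let mg := PySem.Int.floordiv p.2 g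
    let s0 := pvEgLoop (PySem.Int.floordiv st.2 g) mg 1 0
    let t := PySem.Int.mod (PySem.Int.floordiv (p.1 - st.1) g * PySem.Int.mod s0 mg) mg
    some (PySem.Int.mod (st.1 + st.2 * t) (st.2 * mg), st.2 * mg)

-- 'for ai, m in systems[1:]' with early 'return None'
def pvFoldB : Int × Int → List (Int × Int) → Option Int
  | (a, _), [] => some a
  | st, p :: rest =>
      match pvStepB st p with
      | none => none
      | some st' => pvFoldB st' rest

def recover_generator_for_nonce_alt (base_keys : List Int) (nonce_guess : Int) (k : Int) : Option Int :=
  match base_keys with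
  | [] => none  -- base_keys[0] raises IndexError; excluded by Pre_
  | b0 :: _ =>
      let tailSystems : List (Int × Int) :=
        (PySem.List.pyRange 1 base_keys.length 1).map
          (fun i => (PySem.Int.mod ((PySem.List.pyGet? base_keys i).getD 0) (k * (nonce_guess + i)),
                     k * (nonce_guess + i)))
      pvFoldB (b0, k * nonce_guess) tailSystems

-- ===== PRECONDITION & SPEC =====
-- Pre_ excludes inputs where a modulus k*(nonce_guess+i) is 0 or the list is empty:
-- there Python A raises (IndexError / ZeroDivisionError) except when an earlier
-- congruence is already inconsistent, in which case A happens to return None before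
-- reaching the zero modulus (a scan-order accident; B builds the system eagerly and raises).
def Pre_recover_generator_for_nonce (base_keys : List Int) (nonce_guess : Int) (k : Int) : Prop :=
  base_keys ≠ [] ∧
    (2 ≤ base_keys.length →
      k ≠ 0 ∧ (0 < nonce_guess ∨ nonce_guess + (base_keys.length : Int) - 1 < 0))
instance (base_keys : List Int) (nonce_guess : Int) (k : Int) : Decidable (Pre_recover_generator_for_nonce base_keys nonce_guess k) := by unfold Pre_recover_generator_for_nonce; infer_instance

def pvWitness_recover_generator_for_nonce : List Int × Int × Int := ([6, 7], 1, 3)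

def Spec_recover_generator_for_nonce (base_keys : List Int) (nonce_guess : Int) (k : Int) (out : Option Int) : Prop := out = recover_generator_for_nonce_alt base_keys nonce_guess k
instance (base_keys : List Int) (nonce_guess : Int) (k : Int) (out : Option Int) : Decidable (Spec_recover_generator_for_nonce base_keys nonce_guess k out) := by unfold Spec_recover_generator_for_nonce; infer_instance

-- ===== CLAIM (what is proved, stated in full; the proofs are below) =====
def Claim_equal_recover_generator_for_nonce : Prop := ∀ (base_keys : List Int) (nonce_guess : Int) (k : Int), Dom_recover_generator_for_nonce base_keys nonce_guess k → Pre_recover_generator_for_nonce base_keys nonce_guess k → Spec_recover_generator_for_nonce base_keys nonce_guess k (recover_generator_for_nonce base_keys nonce_guess k)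

-- ===== LEMMAS AND PROOFS =====

-- B's iterative Euclid computes the linear combination of A's recursive one
theorem pvEgLoop_eq (r0 r1 s0 s1 : Int) :
    pvEgLoop r0 r1 s0 s1 = s0 * (pvEg r0 r1).1 + s1 * (pvEg r0 r1).2.1 := by
  by_cases h : r1 = 0
  · rw [pvEgLoop, pvEg]; simp [h]
  · rw [pvEgLoop, pvEg]
    simp only [h, dite_false, if_neg h]
    have hm : r0 - PySem.Int.floordiv r0 r1 * r1 = PySem.Int.mod r0 r1 := by
      have := PySem.Int.floordiv_mul_add_mod r0 r1
      omega
    rw [hm, pvEgLoop_eq r1 (PySem.Int.mod r0 r1) s1 (s0 - PySem.Int.floordiv r0 r1 * s1)]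
    ring
termination_by r1.natAbs
decreasing_by exact pvModNatAbsLt r0 r1 h

-- B's loop body equals A's crt_pair
theorem pvStepB_eq (a n ai m : Int) : pvStepB (a, n) (ai, m) = pvCrtPair a n ai m := by
  unfold pvStepB pvCrtPair
  simp only
  split_ifs with h
  · rfl
  · have : pvEgLoop (PySem.Int.floordiv n (Int.gcd n m)) (PySem.Int.floordiv m (Int.gcd n m)) 1 0
        = (pvEg (PySem.Int.floordiv n (Int.gcd n m)) (PySem.Int.floordiv m (Int.gcd n m))).1 := by
      rw [pvEgLoop_eq]; ring
    rw [this]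

-- folding B's precomputed tail of congruences equals A's index loop
theorem pvFold_eq (bks : List Int) (ng k : Int) (l : List Int) (st : Int × Int) :
    pvLoopA bks ng k l st
      = pvFoldB st (l.map (fun i =>
          (PySem.Int.mod ((PySem.List.pyGet? bks i).getD 0) (k * (ng + i)), k * (ng + i)))) := by
  induction l generalizing st with
  | nil => rcases st with ⟨a, n⟩; rfl
  | cons i rest ih =>
      rcases st with ⟨a, n⟩
      simp only [List.map_cons, pvLoopA, pvFoldB, pvStepB_eq]
      cases pvCrtPair a n (PySem.Int.mod ((PySem.List.pyGet? bks i).getD 0) (k * (ng + i))) (k * (ng + i)) with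
      | none => rfl
      | some st' => exact ih st'

-- ===== VERDICT (by name: the statement is the Claim_ definition above) =====
theorem recover_generator_for_nonce_spec : Claim_equal_recover_generator_for_nonce := by
  intro bks ng k _ _
  unfold Spec_recover_generator_for_nonce recover_generator_for_nonce recover_generator_for_nonce_alt
  cases bks with
  | nil => rfl
  | cons b0 rest =>
      simp only [PySem.List.pyGet?_zero_cons]
      rw [pvFold_eq]
      norm_num
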